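-- pv_equiv track=rewrite | github.com/IguanaYu/test4 | functions/general.py | listCount
-- ===== SOURCE A (Python) =====
-- def listCount(valueList):
--     countDict = dict()
--     for value in valueList:
--         if value in countDict:
--             countDict[value] += 1
--         else:
--             countDict[value] = 1
--     res = set(countDict.values())
--     return res
-- ===== SOURCE B (Python) =====
-- def listCount(valueList):
--     return {valueList.count(v) for v in set(valueList)}
-- ===== Notes on version B (the rewrite author's own statement) =====
-- stated objective: idiomatic
-- what changed: Replaces A's single accumulating dict pass (conditional increment per element, then set of values) with a set comprehension that first dedups the list and then re-scans the whole list with valueList.count(v) for each distinct value, maintaining no running state.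
import Mathlib
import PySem

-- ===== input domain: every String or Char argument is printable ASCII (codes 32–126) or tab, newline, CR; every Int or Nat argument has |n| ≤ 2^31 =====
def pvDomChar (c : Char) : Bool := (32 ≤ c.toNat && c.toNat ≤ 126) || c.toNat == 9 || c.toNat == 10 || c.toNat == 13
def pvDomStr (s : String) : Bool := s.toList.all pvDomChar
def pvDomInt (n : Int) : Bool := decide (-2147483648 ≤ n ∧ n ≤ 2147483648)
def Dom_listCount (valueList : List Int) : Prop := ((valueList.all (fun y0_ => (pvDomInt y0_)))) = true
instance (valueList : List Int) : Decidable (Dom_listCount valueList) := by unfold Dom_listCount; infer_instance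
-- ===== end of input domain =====

-- B is the idiomatic set comprehension {valueList.count(v) for v in set(valueList)}: dedup once, then
-- one full count-scan per distinct value, instead of A's single accumulating dict pass. Not faster.

-- ===== PORT A =====
-- 'for value in valueList: if value in countDict: countDict[value] += 1 else: countDict[value] = 1',
-- then 'set(countDict.values())' (a set: compared as a finite set, per the type convention).
def listCount (valueList : List Int) : List Int :=
  let countDict : PySem.Dict Int Int :=
    valueList.foldl
      (fun d value =>
        if d.contains value then d.insert value (d.getD value 0 + 1)
        else d.insert value 1)
      PySem.Dict.empty
  PySem.Set.ofList countDict.values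

-- ===== PORT B =====
-- '{valueList.count(v) for v in set(valueList)}': fold over the distinct values, adding each count to a set.
def listCount_alt (valueList : List Int) : List Int :=
  (PySem.Set.ofList valueList).foldl
    (fun s v => PySem.Set.add s ((valueList.count v : Int)))
    PySem.Set.empty

-- ===== PRECONDITION & SPEC =====
def Spec_listCount (valueList : List Int) (out : List Int) : Prop := out = listCount_alt valueList
instance (valueList : List Int) (out : List Int) : Decidable (Spec_listCount valueList out) := by unfold Spec_listCount; infer_instance

-- ===== CLAIM (what is proved, stated in full; the proofs are below) =====
def Claim_equal_listCount : Prop := ∀ (valueList : List Int), Dom_listCount valueList → Spec_listCount valueList (listCount valueList)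

-- ===== LEMMAS AND PROOFS =====

-- A's loop body is extensionally 'insert value (getD value 0 + 1)' in both branches.
theorem listCount_body_eq :
    (fun (d : PySem.Dict Int Int) value =>
        if d.contains value then d.insert value (d.getD value 0 + 1)
        else d.insert value 1)
      = fun d value => d.insert value (d.getD value 0 + 1) := by
  funext d value
  by_cases h : d.contains value = true
  · simp [h]
  · simp only [Bool.not_eq_true] at h
    simp [h, PySem.Dict.getD_of_not_contains (h := h)]

theorem listCount_spec : Claim_equal_listCount := by
  intro valueList _
  unfold Spec_listCount listCount listCount_alt
  rw [listCount_body_eq, PySem.Dict.foldl_insert_getD_add_one_eq_counter]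
  show PySem.Set.ofList (PySem.Dict.counter valueList).values = _
  have hv : (PySem.Dict.counter valueList).values
      = (PySem.Set.ofList valueList).map (fun k => (valueList.count k : Int)) := by
    simp only [PySem.Dict.values, PySem.Dict.items_counter, List.map_map]
    rfl
  rw [hv, ← PySem.Set.update_nil_left, PySem.Set.update_map_eq_foldl_add]
  rfl
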